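-- pv_equiv track=rewrite | github.com/marrcio/relate-kanji | resources/util/toolbox/kanjitools.py | get_contents_subgroups
-- ===== SOURCE A (Python) =====
-- import itertools
--
-- def condensate_contents(contents, squares, also_join=True):
--     """Joins two list in a round-robbin manner.
--
--     Example: contents = ['a', 'b', 'c']; squares = ['+', '*']
--     result = 'a+b*c'
--     """
--     condensed_list = [elem
--                       for sublist in itertools.zip_longest(contents,squares, fillvalue='')
--                       for elem in sublist]
--     if condensed_list:
--         condensed_list.pop()
--     if also_join:
--         return ''.join(condensed_list)
--     else:
--         return condensed_list
--
-- def get_contents_subgroups(contents, squares, complete=False):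
--     condensed_list = condensate_contents(contents, squares, also_join=False)
--     l = len(condensed_list)
--     if complete:
--         for j in range(l, 1, -1): # from the length up to two elements
--             for i in range(l-j+1):
--                 yield ''.join(condensed_list[i:i+j])
--         for elem in contents:
--             yield elem
--     else:
--         for i in range(0, l - 2, 2):
--             yield ''.join(condensed_list[i:i+3])
-- ===== SOURCE B (Python) =====
-- def get_contents_subgroups(contents, squares, complete=False):
--     # No condensed list and no per-window join: a cell(t) accessor computes the t-th
--     # interleaved element by index arithmetic, and the complete branch builds each row of
--     # windows by dynamic programming (extend the previous-width window by one cell),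
--     # emitting the rows back-to-front; the else branch is a closed-form triple per k.
--     nc, ns = len(contents), len(squares)
--     m = max(nc, ns)
--     l = 2 * m - 1 if m else 0
--
--     def cell(t):
--         k, odd = divmod(t, 2)
--         if odd:
--             return squares[k] if k < ns else ''
--         return contents[k] if k < nc else ''
--
--     if complete:
--         row = [cell(i) for i in range(l)]  # width-1 windows
--         rows = []
--         for j in range(2, l + 1):
--             row = [row[i] + cell(i + j - 1) for i in range(l - j + 1)]
--             rows.append(row)
--         for r in reversed(rows):
--             yield from r
--         yield from contents
--     else:
--         for k in range(m - 1):
--             yield cell(2 * k) + cell(2 * k + 1) + cell(2 * k + 2)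
-- ===== Notes on version B (the rewrite author's own statement) =====
-- stated objective: alternative
-- what changed: B never materialises the condensed list or joins sublists: a cell(t) accessor computes each interleaved element by index arithmetic (divmod), the complete branch builds each row of windows by dynamic programming extending the previous-width window by one cell and emits the rows back-to-front, and the non-complete branch yields a closed-form triple cell(2k)+cell(2k+1)+cell(2k+2) per k.
import Mathlib
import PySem

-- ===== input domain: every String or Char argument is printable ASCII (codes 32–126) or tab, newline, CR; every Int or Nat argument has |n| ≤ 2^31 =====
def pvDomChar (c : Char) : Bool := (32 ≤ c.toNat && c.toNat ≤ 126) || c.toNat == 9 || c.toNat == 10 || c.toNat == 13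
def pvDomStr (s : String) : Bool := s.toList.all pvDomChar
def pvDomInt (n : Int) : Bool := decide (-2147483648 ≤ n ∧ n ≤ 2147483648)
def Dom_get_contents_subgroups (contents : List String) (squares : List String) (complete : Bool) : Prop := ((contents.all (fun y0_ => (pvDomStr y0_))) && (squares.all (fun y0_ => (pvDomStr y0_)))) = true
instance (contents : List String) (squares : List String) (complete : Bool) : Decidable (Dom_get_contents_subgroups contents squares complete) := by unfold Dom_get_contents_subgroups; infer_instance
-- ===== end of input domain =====

-- B never builds the condensed list: a cell(t) accessor computes its t-th element by index
-- arithmetic, the complete branch builds each row of windows by dynamic programming (extending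
-- the previous-width window by one cell) and emits the rows back-to-front, and the else branch
-- is a closed-form triple per k (alternative decomposition; generator compared as a list).

-- ===== PORT A =====
-- itertools.zip_longest(contents, squares, fillvalue='') flattened by the comprehension
def pvZipLongestFlat : List String → List String → List String
  | [], [] => []
  | x :: xs, [] => x :: "" :: pvZipLongestFlat xs []
  | [], y :: ys => "" :: y :: pvZipLongestFlat [] ys
  | x :: xs, y :: ys => x :: y :: pvZipLongestFlat xs ys

def condensate_contents (contents squares : List String) : List String :=
  let cl := pvZipLongestFlat contents squares
  if cl.isEmpty then cl else cl.dropLast   -- 'if condensed_list: condensed_list.pop()'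

def get_contents_subgroups (contents : List String) (squares : List String) (complete : Bool) : List String :=
  let cond := condensate_contents contents squares
  let l : Int := cond.length
  if complete then
    ((PySem.List.pyRange l 1 (-1)).flatMap (fun j =>
      (PySem.List.pyRange 0 (l - j + 1) 1).map (fun i =>
        PySem.Str.join "" (PySem.List.slice cond (some i) (some (i + j))))))
      ++ contents
  else
    (PySem.List.pyRange 0 (l - 2) 2).map (fun i =>
      PySem.Str.join "" (PySem.List.slice cond (some i) (some (i + 3))))

-- ===== PORT B =====
-- def cell(t): k, odd = divmod(t, 2); return (squares[k] if k < ns else '') if odd else (contents[k] if k < nc else '')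
def pvCellB (contents squares : List String) (t : Int) : String :=
  let k := PySem.Int.floordiv t 2
  let odd := PySem.Int.mod t 2
  if odd ≠ 0 then (if k < (squares.length : Int) then PySem.List.pyGetD squares k "" else "")
  else (if k < (contents.length : Int) then PySem.List.pyGetD contents k "" else "")

def get_contents_subgroups_alt (contents : List String) (squares : List String) (complete : Bool) : List String :=
  let m : Nat := max contents.length squares.length
  let l : Int := if m ≠ 0 then 2 * (m : Int) - 1 else 0
  if complete then
    -- row = [cell(i) for i in range(l)]; for j in range(2, l+1): row = [row[i] + cell(i+j-1) …]; rows.append(row)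
    let row0 := (PySem.List.pyRange 0 l 1).map (pvCellB contents squares)
    let st := (PySem.List.pyRange 2 (l + 1) 1).foldl
      (fun (st : List String × List (List String)) j =>
        let row' := (PySem.List.pyRange 0 (l - j + 1) 1).map
          (fun i => PySem.List.pyGetD st.1 i "" ++ pvCellB contents squares (i + j - 1))
        (row', st.2 ++ [row']))
      (row0, [])
    st.2.reverse.flatten ++ contents   -- 'for r in reversed(rows): yield from r' then 'yield from contents'
  else
    (PySem.List.pyRange 0 ((m : Int) - 1) 1).map (fun k =>
      pvCellB contents squares (2 * k) ++ pvCellB contents squares (2 * k + 1)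
        ++ pvCellB contents squares (2 * k + 2))

-- ===== PRECONDITION & SPEC =====
def Spec_get_contents_subgroups (contents : List String) (squares : List String) (complete : Bool) (out : List String) : Prop := out = get_contents_subgroups_alt contents squares complete
instance (contents : List String) (squares : List String) (complete : Bool) (out : List String) : Decidable (Spec_get_contents_subgroups contents squares complete out) := by unfold Spec_get_contents_subgroups; infer_instance

-- ===== CLAIM (what is proved, stated in full; the proofs are below) =====
def Claim_equal_get_contents_subgroups : Prop := ∀ (contents : List String) (squares : List String) (complete : Bool), Dom_get_contents_subgroups contents squares complete → Spec_get_contents_subgroups contents squares complete (get_contents_subgroups contents squares complete)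

-- ===== LEMMAS AND PROOFS =====

-- A's window: join of the condensed sublist [i:i+j]; B's rows are proved equal to rows of these
def pvW (cond : List String) (i j : Int) : String :=
  PySem.Str.join "" (PySem.List.slice cond (some i) (some (i + j)))

def pvRow (cond : List String) (j : Int) : List String :=
  (PySem.List.pyRange 0 ((cond.length : Int) - j + 1) 1).map (fun i => pvW cond i j)

-- condensate always drops the last element (dropLast [] = [])
theorem pvCondensate_eq (c s : List String) :
    condensate_contents c s = (pvZipLongestFlat c s).dropLast := by
  unfold condensate_contents
  dsimp only
  cases h : (pvZipLongestFlat c s).isEmpty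
  · simp
  · simp [List.isEmpty_iff.mp h]

theorem pvZlfLen (c s : List String) :
    (pvZipLongestFlat c s).length = 2 * max c.length s.length := by
  induction c generalizing s with
  | nil =>
    induction s with
    | nil => simp [pvZipLongestFlat]
    | cons y ys ih => simp [pvZipLongestFlat, ih]; omega
  | cons x xs ih =>
    cases s with
    | nil => simp [pvZipLongestFlat, ih]; omega
    | cons y ys => simp [pvZipLongestFlat, ih]; omega

theorem pvZlfEven (c s : List String) (k : Nat) :
    (pvZipLongestFlat c s).getD (2 * k) "" = c.getD k "" := by
  induction c generalizing s k with
  | nil =>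
    induction s generalizing k with
    | nil => simp [pvZipLongestFlat]
    | cons y ys ih =>
      cases k with
      | zero => simp [pvZipLongestFlat]
      | succ k' =>
        rw [pvZipLongestFlat, show 2 * (k' + 1) = (2 * k' + 1) + 1 from by ring,
          List.getD_cons_succ, List.getD_cons_succ, ih]
        simp
  | cons x xs ih =>
    cases s with
    | nil =>
      cases k with
      | zero => simp [pvZipLongestFlat]
      | succ k' =>
        rw [pvZipLongestFlat, show 2 * (k' + 1) = (2 * k' + 1) + 1 from by ring,
          List.getD_cons_succ, List.getD_cons_succ, ih, List.getD_cons_succ]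
    | cons y ys =>
      cases k with
      | zero => simp [pvZipLongestFlat]
      | succ k' =>
        rw [pvZipLongestFlat, show 2 * (k' + 1) = (2 * k' + 1) + 1 from by ring,
          List.getD_cons_succ, List.getD_cons_succ, ih, List.getD_cons_succ]

theorem pvZlfOdd (c s : List String) (k : Nat) :
    (pvZipLongestFlat c s).getD (2 * k + 1) "" = s.getD k "" := by
  induction c generalizing s k with
  | nil =>
    induction s generalizing k with
    | nil => simp [pvZipLongestFlat]
    | cons y ys ih =>
      cases k with
      | zero => simp [pvZipLongestFlat]
      | succ k' =>
        rw [pvZipLongestFlat, show 2 * (k' + 1) + 1 = (2 * k' + 1 + 1) + 1 from by ring,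
          List.getD_cons_succ, List.getD_cons_succ, ih, List.getD_cons_succ]
  | cons x xs ih =>
    cases s with
    | nil =>
      cases k with
      | zero => simp [pvZipLongestFlat]
      | succ k' =>
        rw [pvZipLongestFlat, show 2 * (k' + 1) + 1 = (2 * k' + 1 + 1) + 1 from by ring,
          List.getD_cons_succ, List.getD_cons_succ, ih]
        simp
    | cons y ys =>
      cases k with
      | zero => simp [pvZipLongestFlat]
      | succ k' =>
        rw [pvZipLongestFlat, show 2 * (k' + 1) + 1 = (2 * k' + 1 + 1) + 1 from by ring,
          List.getD_cons_succ, List.getD_cons_succ, ih, List.getD_cons_succ]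

-- B's cell(t) is the t-th element of the flattened zip_longest, for every t ≥ 0
theorem pvCellB_eq_zlf (c s : List String) (t : Nat) :
    pvCellB c s (t : Int) = (pvZipLongestFlat c s).getD t "" := by
  have hdiv : PySem.Int.floordiv (t : Int) 2 = ((t / 2 : Nat) : Int) := by
    exact_mod_cast PySem.Int.floordiv_natCast t 2
  have hmod : PySem.Int.mod (t : Int) 2 = ((t % 2 : Nat) : Int) := by
    exact_mod_cast PySem.Int.mod_natCast t 2
  unfold pvCellB
  dsimp only
  rw [hdiv, hmod]
  rcases Nat.even_or_odd t with ⟨k, hk⟩ | ⟨k, hk⟩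
  · have ht : t = 2 * k := by omega
    subst ht
    have h1 : 2 * k % 2 = 0 := by omega
    have h2 : 2 * k / 2 = k := by omega
    rw [h1, h2, pvZlfEven]
    simp only [Nat.cast_zero, ne_eq, not_true_eq_false, if_false, PySem.List.pyGetD_natCast,
      Nat.cast_lt]
    by_cases hkc : k < c.length
    · simp [hkc]
    · simp [hkc]
  · have ht : t = 2 * k + 1 := by omega
    subst ht
    have h1 : (2 * k + 1) % 2 = 1 := by omega
    have h2 : (2 * k + 1) / 2 = k := by omega
    rw [h1, h2, pvZlfOdd]
    simp only [Nat.cast_one, ne_eq, one_ne_zero, not_false_eq_true, if_true,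
      PySem.List.pyGetD_natCast, Nat.cast_lt]
    by_cases hks : k < s.length
    · simp [hks]
    · simp [hks]

-- … and hence of the condensed list itself, below the dropped last element
theorem pvCellB_eq_cond (c s : List String) (t : Nat)
    (ht : t < (condensate_contents c s).length) :
    pvCellB c s (t : Int) = (condensate_contents c s).getD t "" := by
  rw [pvCellB_eq_zlf, pvCondensate_eq] at *
  have h1 : t < (pvZipLongestFlat c s).length := by
    have := List.length_dropLast (xs := pvZipLongestFlat c s); omega
  rw [List.getD_eq_getElem _ _ ht, List.getD_eq_getElem _ _ h1, List.getElem_dropLast]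

-- windows on the drop/take level: join "" over List Char is flatten
theorem pvJoinNil (ls : List (List Char)) : PySem.Chars.join [] ls = ls.flatten := by
  induction ls with
  | nil => rfl
  | cons h t ih =>
    cases t with
    | nil => simp [PySem.Chars.join_singleton]
    | cons b r => rw [PySem.Chars.join_cons_cons]; simp_all

-- extending a window of width b by its next cell gives the window of width b+1
theorem pvWext (cond : List String) (a b : Nat) (h : a + b < cond.length) :
    PySem.Str.join "" ((cond.drop a).take b) ++ cond.getD (a + b) ""
      = PySem.Str.join "" ((cond.drop a).take (b + 1)) := by
  apply String.toList_inj.mp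
  rw [String.toList_append, PySem.Str.toList_join, PySem.Str.toList_join]
  have hsep : ("" : String).toList = ([] : List Char) := rfl
  rw [hsep, pvJoinNil, pvJoinNil]
  have hb : b < (cond.drop a).length := by simp; omega
  rw [List.take_add_one, List.getElem?_eq_getElem hb, List.getD_eq_getElem _ _ (by omega : a + b < cond.length)]
  simp [List.getElem_drop]

theorem pvWone (cond : List String) (a : Nat) (h : a < cond.length) :
    PySem.Str.join "" ((cond.drop a).take 1) = cond.getD a "" := by
  have h0 : (0 : Nat) + 1 = 1 := rfl
  rw [← h0, ← pvWext cond a 0 (by omega)]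
  simp
  rfl

theorem pvW_natCast (cond : List String) (a b : Nat) :
    pvW cond (a : Int) (b : Int) = PySem.Str.join "" ((cond.drop a).take b) := by
  unfold pvW
  rw [PySem.List.slice_natCast_add]

-- one DP step produces the next row of windows
theorem pvRowStep (c s cond : List String)
    (hcell : ∀ t : Nat, t < cond.length → pvCellB c s (t : Int) = cond.getD t "")
    (j : Int) (hj : 2 ≤ j) :
    (PySem.List.pyRange 0 ((cond.length : Int) - j + 1) 1).map
        (fun i => PySem.List.pyGetD (pvRow cond (j - 1)) i "" ++ pvCellB c s (i + j - 1))
      = pvRow cond j := by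
  unfold pvRow
  apply List.map_congr_left
  intro i hi
  obtain ⟨hi0, hi1⟩ := PySem.List.mem_pyRange_one.mp hi
  rw [PySem.List.pyGetD_map_pyRange_of_nonneg _ _ _ _ hi0 (by omega)]
  obtain ⟨a, rfl⟩ := Int.eq_ofNat_of_zero_le hi0
  obtain ⟨b, rfl⟩ := Int.eq_ofNat_of_zero_le (by omega : (0:Int) ≤ j)
  have hb2 : 2 ≤ b := by exact_mod_cast hj
  have hab : a + b ≤ cond.length := by
    have : (a : Int) < (cond.length : Int) - b + 1 := hi1
    omega
  have e1 : (a : Int) + (b : Int) - 1 = ((a + (b - 1) : Nat) : Int) := by push_cast; omega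
  have e2 : (b : Int) - 1 = ((b - 1 : Nat) : Int) := by omega
  rw [e1, e2, hcell (a + (b - 1)) (by omega), pvW_natCast, pvW_natCast,
    pvWext cond a (b - 1) (by omega), show b - 1 + 1 = b from by omega]

-- the first row (width-1 windows) is the list of cells
theorem pvRowOne (c s cond : List String)
    (hcell : ∀ t : Nat, t < cond.length → pvCellB c s (t : Int) = cond.getD t "") :
    (PySem.List.pyRange 0 ((cond.length : Int)) 1).map (pvCellB c s) = pvRow cond 1 := by
  unfold pvRow
  rw [show (cond.length : Int) - 1 + 1 = (cond.length : Int) from by ring]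
  apply List.map_congr_left
  intro i hi
  obtain ⟨hi0, hi1⟩ := PySem.List.mem_pyRange_one.mp hi
  obtain ⟨a, rfl⟩ := Int.eq_ofNat_of_zero_le hi0
  have ha : a < cond.length := by exact_mod_cast hi1
  rw [hcell a ha, show (1 : Int) = ((1 : Nat) : Int) from rfl, pvW_natCast,
    pvWone cond a ha]

-- the DP fold: its state is (current row, all rows built so far)
theorem pvDP (c s cond : List String)
    (hcell : ∀ t : Nat, t < cond.length → pvCellB c s (t : Int) = cond.getD t "")
    (n : Nat) :
    (PySem.List.pyRange 2 (2 + (n : Int)) 1).foldl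
        (fun (st : List String × List (List String)) j =>
          let row' := (PySem.List.pyRange 0 ((cond.length : Int) - j + 1) 1).map
            (fun i => PySem.List.pyGetD st.1 i "" ++ pvCellB c s (i + j - 1))
          (row', st.2 ++ [row']))
        (pvRow cond 1, [])
      = (pvRow cond (1 + (n : Int)),
         (PySem.List.pyRange 2 (2 + (n : Int)) 1).map (pvRow cond)) := by
  induction n with
  | zero => simp [PySem.List.pyRange_one_eq_nil]
  | succ n ih =>
    rw [show (2 : Int) + ((n + 1 : Nat) : Int) = (2 + (n : Int)) + 1 from by push_cast; ring,
      PySem.List.pyRange_one_succ_right (by omega), List.foldl_append, ih]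
    simp only [List.foldl_cons, List.foldl_nil, List.map_append, List.map_cons, List.map_nil]
    have hrow : (PySem.List.pyRange 0 ((cond.length : Int) - (2 + (n : Int)) + 1) 1).map
        (fun i => PySem.List.pyGetD (pvRow cond (1 + (n : Int))) i ""
            ++ pvCellB c s (i + (2 + (n : Int)) - 1))
        = pvRow cond (2 + (n : Int)) := by
      rw [show (1 : Int) + (n : Int) = (2 + (n : Int)) - 1 from by ring]
      exact pvRowStep c s cond hcell (2 + (n : Int)) (by omega)
    rw [hrow, show (1 : Int) + ((n + 1 : Nat) : Int) = 2 + (n : Int) from by push_cast; ring]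

-- length of the condensed list
theorem pvCondLen (c s : List String) :
    (condensate_contents c s).length = 2 * max c.length s.length - 1 := by
  rw [pvCondensate_eq, List.length_dropLast, pvZlfLen]

-- ===== VERDICT (by name: the statement is the Claim_ definition above) =====
theorem get_contents_subgroups_spec : Claim_equal_get_contents_subgroups := by
  intro c s complete _
  unfold Spec_get_contents_subgroups
  unfold get_contents_subgroups get_contents_subgroups_alt
  dsimp only
  have hcell := pvCellB_eq_cond c s
  set cond := condensate_contents c s with hcond
  set m : Nat := max c.length s.length with hm
  have hlen : cond.length = 2 * m - 1 := pvCondLen c s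
  have hl : (if m ≠ 0 then 2 * (m : Int) - 1 else 0) = (cond.length : Int) := by
    by_cases h0 : m = 0
    · simp [h0, hlen]
    · simp [h0, hlen]; omega
  rw [hl]
  cases complete with
  | true =>
    simp only [reduceIte]
    congr 1
    -- A side: reverse the countdown range, turn flatMap into flatten∘map
    rw [PySem.List.pyRange_neg_one_eq_reverse, List.flatMap_def, List.map_reverse,
      show (1 : Int) + 1 = 2 from by norm_num]
    -- B side: run the DP
    by_cases hL : (cond.length : Int) + 1 ≤ 2
    · rw [PySem.List.pyRange_one_eq_nil hL]
      simp
    · have hn : ∃ n : Nat, (cond.length : Int) + 1 = 2 + (n : Int) := ⟨cond.length - 1, by omega⟩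
      obtain ⟨n, hn⟩ := hn
      rw [hn, pvRowOne c s cond hcell, pvDP c s cond hcell n]
      rfl
  | false =>
    simp only [Bool.false_eq_true, reduceIte]
    rw [PySem.List.pyRange_of_pos 0 ((cond.length : Int) - 2) (by norm_num : (0:Int) < 2),
      PySem.List.pyRange_one, List.map_map, List.map_map]
    have hcnt : (if (0:Int) < (cond.length : Int) - 2
          then (((cond.length : Int) - 2 - 0 + 2 - 1) / 2).toNat else 0)
        = ((m : Int) - 1 - 0).toNat := by
      split_ifs with h <;> omega
    rw [hcnt]
    apply List.map_congr_left
    intro k hk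
    have hkm : k < m - 1 := by
      have := List.mem_range.mp hk; omega
    simp only [Function.comp]
    have e0 : (0 : Int) + 2 * (k : Int) = ((2 * k : Nat) : Int) := by push_cast; ring
    have e1 : (0 : Int) + (k : Int) = (k : Int) := by ring
    have e2 : ((2 * k : Nat) : Int) + 1 = ((2 * k + 1 : Nat) : Int) := by push_cast; ring
    have e3 : ((2 * k : Nat) : Int) + 2 = ((2 * k + 2 : Nat) : Int) := by push_cast; ring
    have e4 : ((2 * k : Nat) : Int) + 3 = ((2 * k : Nat) : Int) + ((3 : Nat) : Int) := by
      push_cast; ring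
    have hlt : 2 * k + 2 < cond.length := by omega
    rw [e0, e1]
    rw [show (2 : Int) * (k : Int) = ((2 * k : Nat) : Int) from by push_cast; ring, e2, e3,
      hcell (2 * k) (by omega), hcell (2 * k + 1) (by omega), hcell (2 * k + 2) hlt]
    have : PySem.Str.join "" (PySem.List.slice cond (some ((2 * k : Nat) : Int))
        (some (((2 * k : Nat) : Int) + 3)))
        = PySem.Str.join "" ((cond.drop (2 * k)).take 3) := by
      rw [e4, PySem.List.slice_natCast_add]
    rw [this, show (3 : Nat) = 2 + 1 from rfl, ← pvWext cond (2 * k) 2 (by omega),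
      show (2 : Nat) = 1 + 1 from rfl, ← pvWext cond (2 * k) 1 (by omega),
      pvWone cond (2 * k) (by omega)]
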